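-- pv_equiv track=rewrite | github.com/Deltares/Ribasim-NL | src/ribasim_nl/ribasim_nl/assign_lhm_fractions.py | sort_lhm_fractions
-- ===== SOURCE A (Python) =====
-- def sort_lhm_fractions(items: list[str]) -> list[str]:
--     """
--     Sort LHM fraction labels according to a custom order.
--
--     The sorting rules are:
--     - A predefined set of items is placed at the top (`top_order`)
--     - A predefined set of items is placed at the bottom (`lower_order`)
--     - All remaining items are placed in between, preserving their original order
--     - Items not present in the input are ignored
--     - Duplicate items are removed while preserving the first occurrence
--
--     Parameters
--     ----------
--     items : List[str]
--         List of LHM fraction labels to be sorted.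
--
--     Returns
--     -------
--     List[str]
--         Sorted list of LHM fraction labels following the custom ordering rules.
--
--     Notes
--     -----
--     The function preserves the relative order of items that are not explicitly
--     defined in `top_order` or `lower_order`.
--     """
--     # --- Remove duplicates while preserving original order ---
--     items = list(dict.fromkeys(items))
--
--     # --- Items that should always appear at the top (in this order) ---
--     top_order = ["Initial", "Drainage (primair)", "Drainage (secundair)", "RWZI"]
--
--     # --- Items that should always appear at the bottom (in this order) ---
--     lower_order = ["Buitenland", "Maaiveld", "Neerslag"]
--
--     result: list[str] = []
--
--     # --- Add top-priority items (only if they exist in the input) ---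
--     result += [x for x in top_order if x in items]
--
--     # --- Add all remaining items that are not explicitly ordered ---
--     mentioned = set(top_order + lower_order)
--     result += [x for x in items if x not in mentioned]
--
--     # --- Add bottom-priority items (only if they exist in the input) ---
--     result += [x for x in lower_order if x in items]
--
--     return result
-- ===== SOURCE B (Python) =====
-- def sort_lhm_fractions(items: list[str]) -> list[str]:
--     """Dedup, then one stable keyed sort instead of three bucket passes."""
--     top_order = ["Initial", "Drainage (primair)", "Drainage (secundair)", "RWZI"]
--     lower_order = ["Buitenland", "Maaiveld", "Neerslag"]
--     rank = {name: i for i, name in enumerate(top_order)}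
--     for i, name in enumerate(lower_order):
--         rank[name] = len(top_order) + 1 + i
--     middle = len(top_order)
--     return sorted(dict.fromkeys(items), key=lambda x: rank.get(x, middle))
-- ===== Notes on version B (the rewrite author's own statement) =====
-- stated objective: alternative
-- what changed: Replaces A's three bucket-concatenation passes (top filter + unmentioned filter + bottom filter) with one stable keyed sort of the deduplicated list: a rank dict maps top labels to 0..3 and bottom labels to 5..7, everything else keys to 4, and sorted()'s stability preserves the original order of unlisted items.
import Mathlib
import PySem

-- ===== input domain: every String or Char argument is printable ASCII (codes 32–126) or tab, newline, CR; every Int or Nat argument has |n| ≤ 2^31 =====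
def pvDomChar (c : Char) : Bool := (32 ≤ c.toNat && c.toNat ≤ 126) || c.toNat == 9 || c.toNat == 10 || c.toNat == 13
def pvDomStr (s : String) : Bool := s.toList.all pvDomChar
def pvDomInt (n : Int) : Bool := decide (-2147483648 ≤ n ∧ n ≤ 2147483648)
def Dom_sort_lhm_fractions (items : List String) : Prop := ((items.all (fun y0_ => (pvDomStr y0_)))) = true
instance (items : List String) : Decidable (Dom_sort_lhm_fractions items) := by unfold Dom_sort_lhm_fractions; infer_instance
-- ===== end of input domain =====

-- B replaces A's three bucket-concatenation passes by a single stable keyed sort (objective: alternative decomposition, same cost).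

-- ===== PORT A =====
def sort_lhm_fractions (items : List String) : List String :=
  -- items = list(dict.fromkeys(items))
  let items := PySem.List.dedup items
  let top_order : List String := ["Initial", "Drainage (primair)", "Drainage (secundair)", "RWZI"]
  let lower_order : List String := ["Buitenland", "Maaiveld", "Neerslag"]
  let result : List String := []
  -- result += [x for x in top_order if x in items]
  let result := result ++ top_order.filter (fun x => decide (x ∈ items))
  -- mentioned = set(top_order + lower_order)
  let mentioned : PySem.Set String := PySem.Set.ofList (top_order ++ lower_order)
  -- result += [x for x in items if x not in mentioned]
  let result := result ++ items.filter (fun x => !decide (x ∈ mentioned))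
  -- result += [x for x in lower_order if x in items]
  let result := result ++ lower_order.filter (fun x => decide (x ∈ items))
  result

-- ===== PORT B =====
def sort_lhm_fractions_alt (items : List String) : List String :=
  let top_order : List String := ["Initial", "Drainage (primair)", "Drainage (secundair)", "RWZI"]
  let lower_order : List String := ["Buitenland", "Maaiveld", "Neerslag"]
  -- rank = {name: i for i, name in enumerate(top_order)}
  let rank : PySem.Dict String Int :=
    (PySem.List.enumerate top_order).foldl (fun d p => d.insert p.2 p.1) (PySem.Dict.mk [])
  -- for i, name in enumerate(lower_order): rank[name] = len(top_order) + 1 + i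
  let rank : PySem.Dict String Int :=
    (PySem.List.enumerate lower_order).foldl
      (fun d p => d.insert p.2 (PySem.List.len top_order + 1 + p.1)) rank
  let middle : Int := PySem.List.len top_order
  PySem.List.sorted (PySem.List.dedup items) (fun x => rank.getD x middle) false

-- ===== PRECONDITION & SPEC =====
def Spec_sort_lhm_fractions (items : List String) (out : List String) : Prop := out = sort_lhm_fractions_alt items
instance (items : List String) (out : List String) : Decidable (Spec_sort_lhm_fractions items out) := by unfold Spec_sort_lhm_fractions; infer_instance

-- ===== CLAIM (what is proved, stated in full; the proofs are below) =====
def Claim_equal_sort_lhm_fractions : Prop := ∀ (items : List String), Dom_sort_lhm_fractions items → Spec_sort_lhm_fractions items (sort_lhm_fractions items)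

-- ===== LEMMAS AND PROOFS =====

-- The key function B's sort uses, written out by cases.
def keyF (x : String) : Int :=
  if x = "Initial" then 0
  else if x = "Drainage (primair)" then 1
  else if x = "Drainage (secundair)" then 2
  else if x = "RWZI" then 3
  else if x = "Buitenland" then 5
  else if x = "Maaiveld" then 6
  else if x = "Neerslag" then 7
  else 4

lemma alt_eq_sorted_keyF (items : List String) :
    sort_lhm_fractions_alt items = PySem.List.sorted (PySem.List.dedup items) keyF false := by
  have hk : (fun x => PySem.Dict.getD (PySem.Dict.mk [("Initial",(0:Int)),("Drainage (primair)",1),("Drainage (secundair)",2),("RWZI",3),("Buitenland",5),("Maaiveld",6),("Neerslag",7)]) x 4) = keyF := by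
    funext x
    unfold keyF
    split_ifs with h1 h2 h3 h4 h5 h6 h7 <;>
      [skip; skip; skip; skip; skip; skip; skip;
       (simp only [PySem.Dict.getD, PySem.Dict.get?, List.find?,
          show ("Initial" == x) = false from by simp [Ne.symm h1],
          show ("Drainage (primair)" == x) = false from by simp [Ne.symm h2],
          show ("Drainage (secundair)" == x) = false from by simp [Ne.symm h3],
          show ("RWZI" == x) = false from by simp [Ne.symm h4],
          show ("Buitenland" == x) = false from by simp [Ne.symm h5],
          show ("Maaiveld" == x) = false from by simp [Ne.symm h6],
          show ("Neerslag" == x) = false from by simp [Ne.symm h7]]; rfl)] <;>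
      simp_all [PySem.Dict.getD, PySem.Dict.get?, List.find?]
  show PySem.List.sorted (PySem.List.dedup items) _ false = _
  rw [show ((PySem.List.enumerate (["Buitenland", "Maaiveld", "Neerslag"] : List String)).foldl
      (fun d p => d.insert p.2 (PySem.List.len ["Initial", "Drainage (primair)", "Drainage (secundair)", "RWZI"] + 1 + p.1))
      ((PySem.List.enumerate (["Initial", "Drainage (primair)", "Drainage (secundair)", "RWZI"] : List String)).foldl (fun d p => d.insert p.2 p.1) (PySem.Dict.mk []))) = PySem.Dict.mk [("Initial",(0:Int)),("Drainage (primair)",1),("Drainage (secundair)",2),("RWZI",3),("Buitenland",5),("Maaiveld",6),("Neerslag",7)] from by decide]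
  rw [show PySem.List.len (["Initial", "Drainage (primair)", "Drainage (secundair)", "RWZI"]:List String) = 4 from rfl]
  rw [hk]

lemma insertBy_append {α : Type} (bf : α → α → Bool) (x : α) (ys zs : List α)
    (h : ∀ y ∈ ys, bf x y = false) :
    PySem.List.insertBy bf x (ys ++ zs) = ys ++ PySem.List.insertBy bf x zs := by
  induction ys with
  | nil => simp
  | cons y ys ih =>
      simp only [List.cons_append, PySem.List.insertBy, h y (by simp)]
      simp only [Bool.false_eq_true, if_false, List.cons.injEq, true_and]
      exact ih (fun y hy => h y (by simp [hy]))

lemma insertBy_all_true {α : Type} (bf : α → α → Bool) (x : α) (zs : List α)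
    (h : ∀ z ∈ zs, bf x z = true) :
    PySem.List.insertBy bf x zs = x :: zs := by
  cases zs with
  | nil => rfl
  | cons z t => simp [PySem.List.insertBy, h z (by simp)]

lemma sorted_eq_flatMap_buckets {α : Type} (key : α → Int) (ks : List Int)
    (hks : ks.Pairwise (· < ·)) :
    ∀ xs : List α, (∀ x ∈ xs, key x ∈ ks) →
      PySem.List.sorted xs key false =
        ks.flatMap (fun k => xs.filter (fun x => decide (key x = k))) := by
  intro xs
  induction xs using List.reverseRecOn with
  | nil => simp [PySem.List.sorted]
  | append_singleton l x ih =>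
      intro hmem
      have hx : key x ∈ ks := hmem x (by simp)
      obtain ⟨s, t, hst⟩ := List.append_of_mem hx
      subst hst
      have hp := List.pairwise_append.mp hks
      have hslt : ∀ a ∈ s, a < key x := fun a ha => hp.2.2 a ha (key x) (by simp)
      have htgt : ∀ b ∈ t, key x < b := (List.pairwise_cons.mp hp.2.1).1
      have hIH := ih (fun y hy => hmem y (by simp [hy]))
      -- LHS: sorted (l ++ [x]) = insertBy bf x (sorted l)
      have hL : PySem.List.sorted (l ++ [x]) key false
          = PySem.List.insertBy (fun a b => decide (key a < key b)) x (PySem.List.sorted l key false) := by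
        rw [PySem.List.sorted_eq_foldl_insertBy, PySem.List.sorted_eq_foldl_insertBy, List.foldl_append]
        rfl
      rw [hL, hIH]
      -- split the flatMap
      have hflat : ∀ m : List α, (s ++ key x :: t).flatMap (fun k => m.filter (fun x => decide (key x = k)))
          = s.flatMap (fun k => m.filter (fun x => decide (key x = k)))
            ++ m.filter (fun y => decide (key y = key x))
            ++ t.flatMap (fun k => m.filter (fun x => decide (key x = k))) := by
        intro m; simp [List.flatMap_append]
      rw [hflat]
      rw [insertBy_append _ _ _ _ (by
        intro y hy
        simp only [List.mem_append, List.mem_flatMap, List.mem_filter,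
          decide_eq_true_eq] at hy
        simp only [decide_eq_false_iff_not, not_lt]
        rcases hy with ⟨k, hk, _, hky⟩ | ⟨_, hky⟩
        · exact le_of_lt (hky ▸ hslt k hk)
        · exact le_of_eq hky)]
      rw [insertBy_all_true _ _ _ (by
        intro z hz
        simp only [List.mem_flatMap, List.mem_filter, decide_eq_true_eq] at hz
        obtain ⟨k, hk, _, hkz⟩ := hz
        simp only [decide_eq_true_eq]
        exact hkz ▸ htgt k hk)]
      rw [hflat (l ++ [x])]
      have h1 : (s.flatMap (fun k => (l ++ [x]).filter (fun y => decide (key y = k))))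
          = s.flatMap (fun k => l.filter (fun y => decide (key y = k))) := by
        apply List.flatMap_congr
        intro k hk
        have hne : ¬ key x = k := by have := hslt k hk; omega
        simp [List.filter_append, List.filter, hne]
      have h2 : ((l ++ [x]).filter (fun y => decide (key y = key x)))
          = l.filter (fun y => decide (key y = key x)) ++ [x] := by
        simp [List.filter_append, List.filter]
      have h3 : (t.flatMap (fun k => (l ++ [x]).filter (fun y => decide (key y = k))))
          = t.flatMap (fun k => l.filter (fun y => decide (key y = k))) := by
        apply List.flatMap_congr
        intro k hk
        have hne : ¬ key x = k := by have := htgt k hk; omega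
        simp [List.filter_append, List.filter, hne]
      rw [h1, h2, h3]
      simp

lemma keyF_mem (x : String) : keyF x ∈ ([0,1,2,3,4,5,6,7] : List Int) := by
  unfold keyF; split_ifs <;> simp

lemma filter_eq_single (d : List String) (hd : d.Nodup) (a : String) :
    d.filter (fun x => decide (x = a)) = if a ∈ d then [a] else [] := by
  rw [List.filter_eq]
  by_cases h : a ∈ d
  · rw [List.count_eq_one_of_mem hd h]; simp [h]
  · rw [List.count_eq_zero_of_not_mem h]; simp [h]

-- bucket k of the deduped list is the one labelled item (when k ≠ 4)
lemma bucket_eq (d : List String) (hd : d.Nodup) (k : Int) (a : String) (hka : ∀ x, (keyF x = k) ↔ x = a) :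
    d.filter (fun x => decide (keyF x = k)) = if a ∈ d then [a] else [] := by
  have hpt : ∀ x ∈ d, (decide (keyF x = k)) = (decide (x = a)) := fun x _ => by
    simp [hka x]
  rw [List.filter_congr hpt, filter_eq_single d hd a]

lemma keyF_eq_four_iff (x : String) :
    keyF x = 4 ↔ ¬ x ∈ (["Initial", "Drainage (primair)", "Drainage (secundair)", "RWZI", "Buitenland", "Maaiveld", "Neerslag"] : List String) := by
  unfold keyF; split_ifs <;> simp_all

-- ===== VERDICT (by name: the statement is the Claim_ definition above) =====
set_option maxHeartbeats 1000000 in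
theorem sort_lhm_fractions_spec : Claim_equal_sort_lhm_fractions := by
  intro items _
  unfold Spec_sort_lhm_fractions
  rw [alt_eq_sorted_keyF]
  rw [show sort_lhm_fractions items =
      (["Initial", "Drainage (primair)", "Drainage (secundair)", "RWZI"] : List String).filter
          (fun x => decide (x ∈ PySem.List.dedup items))
        ++ (PySem.List.dedup items).filter
          (fun x => !decide (x ∈ PySem.Set.ofList ((["Initial", "Drainage (primair)", "Drainage (secundair)", "RWZI"] : List String) ++ ["Buitenland", "Maaiveld", "Neerslag"])))
        ++ (["Buitenland", "Maaiveld", "Neerslag"] : List String).filter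
          (fun x => decide (x ∈ PySem.List.dedup items)) from rfl]
  set d := PySem.List.dedup items with hdef
  have hd : d.Nodup := PySem.List.nodup_dedup items
  rw [sorted_eq_flatMap_buckets keyF [0,1,2,3,4,5,6,7] (by decide) d (fun x _ => keyF_mem x)]
  rw [show (PySem.Set.ofList ((["Initial", "Drainage (primair)", "Drainage (secundair)", "RWZI"] : List String) ++ ["Buitenland", "Maaiveld", "Neerslag"]))
      = (["Initial", "Drainage (primair)", "Drainage (secundair)", "RWZI", "Buitenland", "Maaiveld", "Neerslag"] : List String) from by decide]
  have hmid : d.filter (fun x => !decide (x ∈ (["Initial", "Drainage (primair)", "Drainage (secundair)", "RWZI", "Buitenland", "Maaiveld", "Neerslag"] : List String)))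
      = d.filter (fun x => decide (keyF x = 4)) := by
    apply List.filter_congr
    intro x _
    simp [keyF_eq_four_iff x]
  rw [hmid]
  have b0 := bucket_eq d hd 0 "Initial" (fun x => by unfold keyF; split_ifs <;> simp_all)
  have b1 := bucket_eq d hd 1 "Drainage (primair)" (fun x => by unfold keyF; split_ifs <;> simp_all)
  have b2 := bucket_eq d hd 2 "Drainage (secundair)" (fun x => by unfold keyF; split_ifs <;> simp_all)
  have b3 := bucket_eq d hd 3 "RWZI" (fun x => by unfold keyF; split_ifs <;> simp_all)
  have b5 := bucket_eq d hd 5 "Buitenland" (fun x => by unfold keyF; split_ifs <;> simp_all)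
  have b6 := bucket_eq d hd 6 "Maaiveld" (fun x => by unfold keyF; split_ifs <;> simp_all)
  have b7 := bucket_eq d hd 7 "Neerslag" (fun x => by unfold keyF; split_ifs <;> simp_all)
  simp only [List.flatMap_cons, List.flatMap_nil, List.append_nil,
    b0, b1, b2, b3, b5, b6, b7, List.filter_cons, List.filter_nil, decide_eq_true_eq]
  split_ifs <;> simp
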